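-- pv_equiv track=rewrite | github.com/WichapasHim/HimSourceCode | w3_excercise_solution/python/w3_basic_part_2.py | item_52
-- ===== SOURCE A (Python) =====
-- def item_52(x):
--     def is_prime(n):
--         if n<=1:return False
--         if n==2:return True
--         check_prime=0
--         for i in range(2,n):
--             if n%i==0:
--                 check_prime+=1
--
--         return check_prime==0
--     count_prime,num,sum=0,0,0
--     while count_prime!=x:
--         if is_prime(num):
--             count_prime+=1
--             sum+=num
--         num+=1
--
--     return count_prime,sum
-- ===== SOURCE B (Python) =====
-- def item_52(x):
--     def is_prime(n):
--         if n < 2: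
--             return False
--         d = 2
--         while d * d <= n:
--             if n % d == 0:
--                 return False
--             d += 1
--         return True
--     found, total, n = 0, 0, 0
--     while found < x:
--         if is_prime(n):
--             found += 1
--             total += n
--         n += 1
--     return found, total
-- ===== Notes on version B (the rewrite author's own statement) =====
-- stated objective: faster
-- what changed: primality is tested by trial division only up to sqrt(n) with an early return on the first divisor, instead of counting every divisor in 2..n-1; the loop condition becomes found < x so negative x terminates instead of looping forever
import Mathlib
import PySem

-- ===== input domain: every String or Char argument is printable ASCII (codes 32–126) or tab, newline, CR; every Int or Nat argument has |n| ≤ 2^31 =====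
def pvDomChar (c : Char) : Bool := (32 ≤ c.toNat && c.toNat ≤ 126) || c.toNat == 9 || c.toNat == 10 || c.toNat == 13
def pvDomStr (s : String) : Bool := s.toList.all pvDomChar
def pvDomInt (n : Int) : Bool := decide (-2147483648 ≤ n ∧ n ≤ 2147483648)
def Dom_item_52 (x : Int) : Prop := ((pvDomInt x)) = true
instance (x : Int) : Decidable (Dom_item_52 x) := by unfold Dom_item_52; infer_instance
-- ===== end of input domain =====

-- B replaces A's divisor-counting primality test (all i in 2..n-1) by trial division up to
-- sqrt(n) with an early return, and loops with 'found < x' instead of 'count != x'; objective: faster.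


-- ===== PORT A =====
-- A's is_prime: count the divisors of n in range(2, n), then test the count against 0.
def isPrimeA (n : Int) : Bool :=
  if n ≤ 1 then false
  else if n = 2 then true
  else
    let check := (PySem.List.pyRange 2 n 1).foldl
      (fun c i => if PySem.Int.mod n i == 0 then c + 1 else c) (0 : Int)
    check == 0

-- A's while loop; the Nat argument is a totality-guard fuel only (Python's loop, started at
-- count = 0, performs count ≤ x prime hits and far fewer than 2^64 steps for any x ≤ 2^31)
def loopA : Nat → Int → Int → Int → Int → List Int
  | 0, _, count, _, sum => [count, sum]
  | fuel + 1, x, count, num, sum =>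
    if count = x then [count, sum]
    else if isPrimeA num then loopA fuel x (count + 1) (num + 1) (sum + num)
    else loopA fuel x count (num + 1) sum

def item_52 (x : Int) : List Int := loopA (2 ^ 64) x 0 0 0

-- ===== PORT B =====
-- B's is_prime: trial division, d from 2 while d*d ≤ n, early return on the first divisor.
-- The Nat argument is a totality-guard fuel; n.toNat steps always outlast d*d ≤ n (d starts at 2).
def trialB : Nat → Int → Int → Bool
  | 0, _, _ => true
  | fuel + 1, n, d =>
    if d * d ≤ n then
      if PySem.Int.mod n d == 0 then false else trialB fuel n (d + 1)
    else true

def isPrimeB (n : Int) : Bool := if n < 2 then false else trialB n.toNat n 2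

-- B's while loop, totality-guard fuel as in loopA
def loopB : Nat → Int → Int → Int → Int → List Int
  | 0, _, found, _, total => [found, total]
  | fuel + 1, x, found, num, total =>
    if found < x then
      if isPrimeB num then loopB fuel x (found + 1) (num + 1) (total + num)
      else loopB fuel x found (num + 1) total
    else [found, total]

def item_52_alt (x : Int) : List Int := loopB (2 ^ 64) x 0 0 0

-- ===== PRECONDITION & SPEC =====
-- Pre_ excludes negative x, on which Python A's 'while count_prime != x' loops forever (no return).
def Pre_item_52 (x : Int) : Prop := 0 ≤ x
instance (x : Int) : Decidable (Pre_item_52 x) := by unfold Pre_item_52; infer_instance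
def pvWitness_item_52 : Int := (5)
def Spec_item_52 (x : Int) (out : List Int) : Prop := out = item_52_alt x
instance (x : Int) (out : List Int) : Decidable (Spec_item_52 x out) := by unfold Spec_item_52; infer_instance

-- ===== CLAIM (what is proved, stated in full; the proofs are below) =====
def Claim_equal_item_52 : Prop := ∀ (x : Int), Dom_item_52 x → Pre_item_52 x → Spec_item_52 x (item_52 x)

-- ===== LEMMAS AND PROOFS =====
theorem self_le_sq {d : Int} (h : 0 ≤ d) : d ≤ d * d := by
  rcases h.eq_or_lt with h0 | h0
  · rw [← h0]; norm_num
  · exact le_mul_of_one_le_left (le_of_lt h0) h0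

theorem sq_mono {d e : Int} (hd : 0 ≤ d) (h : d ≤ e) : d * d ≤ e * e :=
  mul_le_mul h h hd (hd.trans h)

theorem isPrimeA_iff (n : Int) : isPrimeA n = true ↔ (n.toNat).Prime := by
  unfold isPrimeA
  split_ifs with h1 h2
  · simp only [false_iff]
    intro hp; have := hp.two_le; omega
  · simp only [true_iff, h2]; decide
  · rw [PySem.List.foldl_count_if]
    simp only [beq_iff_eq, zero_add, Nat.cast_eq_zero, List.countP_eq_zero]
    constructor
    · intro hno
      rw [Nat.prime_def_lt]
      refine ⟨by omega, fun m hm hdvd => ?_⟩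
      by_contra hne
      have hm0 : 0 < m := Nat.pos_of_dvd_of_pos hdvd (by omega)
      have hm2 : 2 ≤ m := by omega
      have hmem : (m : Int) ∈ PySem.List.pyRange 2 n 1 :=
        PySem.List.mem_pyRange_one.mpr ⟨by exact_mod_cast hm2, by omega⟩
      have := hno _ hmem
      rw [PySem.Int.mod_eq_zero_iff_dvd] at this
      exact this (by exact_mod_cast Int.toNat_of_nonneg (by omega : (0:Int) ≤ n) ▸
        Int.natCast_dvd_natCast.mpr hdvd)
    · intro hp i hi
      rw [PySem.List.mem_pyRange_one] at hi
      rw [PySem.Int.mod_eq_zero_iff_dvd]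
      intro hdvd
      have hin : i.toNat ∣ n.toNat := by
        rw [← Int.natCast_dvd_natCast, Int.toNat_of_nonneg (by omega : (0:Int) ≤ i),
          Int.toNat_of_nonneg (by omega : (0:Int) ≤ n)]
        exact hdvd
      have := (Nat.prime_def_lt.mp hp).2 i.toNat (by omega) hin
      omega

theorem trialB_iff (n : Int) : ∀ (fuel : Nat) (d : Int), 0 ≤ d → (n + 1 - d).toNat ≤ fuel →
    (trialB fuel n d = true ↔ ∀ e, d ≤ e → e * e ≤ n → ¬ e ∣ n) := by
  intro fuel
  induction fuel with
  | zero =>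
    intro d hd hk
    have hds := self_le_sq hd
    simp only [trialB, true_iff]
    intro e he hee
    have hes := self_le_sq (hd.trans he)
    exact absurd hee (by omega)
  | succ k ih =>
    intro d hd hk
    simp only [trialB]
    split_ifs with hdd hmod
    · simp only [false_iff]
      rw [beq_iff_eq, PySem.Int.mod_eq_zero_iff_dvd] at hmod
      intro hall
      exact hall d (le_refl d) hdd hmod
    · have hdn : d ≤ n := (self_le_sq hd).trans hdd
      rw [ih (d + 1) (by omega) (by omega)]
      rw [beq_iff_eq, PySem.Int.mod_eq_zero_iff_dvd] at hmod
      constructor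
      · intro h e he hee hdvd
        rcases eq_or_lt_of_le he with he' | he'
        · exact hmod (he' ▸ hdvd)
        · exact h e (by omega) hee hdvd
      · intro h e he hee
        exact h e (by omega) hee
    · simp only [true_iff]
      intro e he hee
      have := sq_mono hd he
      exact absurd hee (by omega)

theorem isPrimeB_iff (n : Int) : isPrimeB n = true ↔ (n.toNat).Prime := by
  unfold isPrimeB
  split_ifs with h1
  · simp only [false_iff]
    intro hp; have := hp.two_le; omega
  · push Not at h1
    rw [trialB_iff n n.toNat 2 (by omega) (by omega)]
    constructor
    · intro hno
      rw [Nat.prime_def_le_sqrt]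
      refine ⟨by omega, fun m hm hsq => ?_⟩
      intro hdvd
      have hmm : m * m ≤ n.toNat := Nat.le_sqrt.mp hsq
      refine hno (m : Int) (by exact_mod_cast hm) (by omega) ?_
      exact_mod_cast Int.toNat_of_nonneg (by omega : (0:Int) ≤ n) ▸ Int.natCast_dvd_natCast.mpr hdvd
    · intro hp e he hee hdvd
      have hn0 : (0:Int) ≤ n := by omega
      have hin : e.toNat ∣ n.toNat := by
        rw [← Int.natCast_dvd_natCast, Int.toNat_of_nonneg (by omega : (0:Int) ≤ e),
          Int.toNat_of_nonneg hn0]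
        exact hdvd
      have hsq : e.toNat ≤ (n.toNat).sqrt := Nat.le_sqrt.mpr (by
        have h5 : (e.toNat : Int) * (e.toNat : Int) ≤ (n.toNat : Int) := by
          rw [Int.toNat_of_nonneg (by omega : (0:Int) ≤ e), Int.toNat_of_nonneg hn0]; exact hee
        exact_mod_cast h5)
      exact (Nat.prime_def_le_sqrt.mp hp).2 e.toNat (by omega) hsq hin

theorem isPrime_eq (n : Int) : isPrimeA n = isPrimeB n := by
  have hA := isPrimeA_iff n
  have hB := isPrimeB_iff n
  cases hA' : isPrimeA n <;> cases hB' : isPrimeB n <;> simp_all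

theorem loop_eq : ∀ (fuel : Nat) (x count num sum : Int), count ≤ x →
    loopA fuel x count num sum = loopB fuel x count num sum := by
  intro fuel
  induction fuel with
  | zero => intro x count num sum _; rfl
  | succ f ih =>
    intro x count num sum hle
    simp only [loopA, loopB]
    rcases eq_or_lt_of_le hle with heq | hlt
    · rw [if_pos heq, if_neg (by omega)]
    · rw [if_neg (by omega), if_pos hlt, ← isPrime_eq num]
      split_ifs with hp
      · exact ih x (count + 1) (num + 1) (sum + num) (by omega)
      · exact ih x count (num + 1) sum (by omega)

-- ===== VERDICT (by name: the statement is the Claim_ definition above) =====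
theorem item_52_spec : Claim_equal_item_52 := by
  intro x _ hpre
  unfold Spec_item_52 item_52 item_52_alt
  exact loop_eq (2 ^ 64) x 0 0 0 hpre
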